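-- pv_equiv track=rewrite | github.com/PaddlePaddle/Paddle | tools/sampcd_processor.py | single_defcom_extract
-- ===== SOURCE A (Python) =====
-- def single_defcom_extract(start_from, srcls, is_class_begin=False):
--     """
--     to extract a def function/class/method comments body
--
--     Args:
--         start_from(int): the line num of "def" header
--         srcls(list): the source file in lines
--         is_class_begin(bool): whether the start_from is a beginning a class. \
--         For a sole class body itself may end up with its method if it has no
--         docstring. But the body of \
--         a common def function can only be ended up by a none-indented def/class
--
--     Returns:
--         string : the extracted comment body, inclusive of its quote marks.
--
--     """
--
--     i = start_from
--     fcombody = ""  # def comment body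
--     comstart = -1  # the starting line index of comment mark "'''" or """"""
--     # if it is not -1, it indicates the loop is in the comment body
--     comstyle = 0  # comment mark style ,comments quoted with ''' is coded as 1
--     # comments quoted with """ is coded as 2
--     for x in range(i + 1, len(srcls)):
--         if is_class_begin:
--             if srcls[x].replace('\t', '    ').startswith('    def '):
--                 break
--         if srcls[x].startswith('def ') or srcls[x].startswith('class '):
--             break
--         else:
--             if comstart == -1:
--                 s = srcls[x].replace(" ", '').replace("\t",
--                                                       '').replace("\n", '')
--                 if s.startswith("\"\"\"") or s.startswith("r\"\"\""):
--                     comstart = x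
--                     comstyle = 2
--                     continue
--             if (comstyle == 2 and comstart != -1 and
--                     srcls[x].replace(" ", '').replace("\t", '').replace(
--                         "\n", '').startswith("\"\"\"")):
--                 break
--             if comstart == -1:
--                 s = srcls[x].replace(" ", '').replace("\t",
--                                                       '').replace("\n", '')
--                 if s.startswith("\'\'\'") or s.startswith("r\'\'\'"):
--                     comstart = x
--                     comstyle = 1
--                     continue
--             if (comstyle == 1 and comstart != -1 and
--                     srcls[x].replace(" ", '').replace("\t", '').replace(
--                         "\n", '').startswith("\'\'\'")):
--                 break
--             if (comstart !=
--                     -1):  # when the comments start, begin to add line to fcombody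
--                 fcombody += srcls[x]
--     return fcombody
-- ===== SOURCE B (Python) =====
-- def single_defcom_extract(start_from, srcls, is_class_begin=False):
--     """Index-and-slice rewrite: truncate the forward slice at the first def/class
--     boundary once, locate the opener and closer by index, and return one slice
--     of the region joined -- no stateful scan with breaks."""
--
--     def boundary(line):
--         return (is_class_begin and line.replace('\t', '    ').startswith('    def ')
--                 or line.startswith('def ') or line.startswith('class '))
--
--     def condensed(line):
--         return line.replace(' ', '').replace('\t', '').replace('\n', '')
--
--     def opener(line):
--         s = condensed(line)
--         if s.startswith('"""') or s.startswith('r"""'):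
--             return '"""'
--         if s.startswith("'''") or s.startswith("r'''"):
--             return "'''"
--         return None
--
--     tail = srcls[start_from + 1:]
--     bidx = next((k for k, l in enumerate(tail) if boundary(l)), len(tail))
--     region = tail[:bidx]
--     oidx = next((k for k, l in enumerate(region) if opener(l)), None)
--     if oidx is None:
--         return ''
--     quote = opener(region[oidx])
--     rest = region[oidx + 1:]
--     cidx = next((k for k, l in enumerate(rest)
--                  if condensed(l).startswith(quote)), len(rest))
--     return ''.join(rest[:cidx])
-- ===== Notes on version B (the rewrite author's own statement) =====
-- stated objective: alternative
-- what changed: A's single stateful scan (mutable fcombody/comstart/comstyle with breaks and continues) is replaced by index-and-slice pipeline: truncate the forward slice once at the first boundary index, locate the opener index and the closer index with findIndex-style generators, and return one slice of the region joined; no loop state survives across lines.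
-- outside the precondition, e.g. on single_defcom_extract(-3, ['"""', 'a', '"""'], False): A returns 'a', B returns ''
import Mathlib
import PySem

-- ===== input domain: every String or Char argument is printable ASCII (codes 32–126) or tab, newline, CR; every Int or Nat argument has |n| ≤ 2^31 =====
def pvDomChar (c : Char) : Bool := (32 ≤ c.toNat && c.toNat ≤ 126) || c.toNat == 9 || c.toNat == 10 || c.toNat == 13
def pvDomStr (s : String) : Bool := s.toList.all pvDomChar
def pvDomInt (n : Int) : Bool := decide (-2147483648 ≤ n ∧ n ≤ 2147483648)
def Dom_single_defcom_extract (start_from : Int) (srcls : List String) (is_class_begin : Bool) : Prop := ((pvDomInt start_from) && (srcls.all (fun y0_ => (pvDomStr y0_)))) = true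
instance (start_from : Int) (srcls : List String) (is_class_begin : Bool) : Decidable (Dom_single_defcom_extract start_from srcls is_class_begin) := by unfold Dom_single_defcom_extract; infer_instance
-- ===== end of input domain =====

-- B replaces A's stateful break/continue scan by an index-and-slice pipeline (truncate the
-- forward slice at the first boundary, find opener/closer indices, return one joined slice);
-- objective: alternative decomposition, same linear cost. Equivalence is claimed on
-- Pre_ (start_from ≥ -1); A raises IndexError for start_from < -len(srcls)-1.

-- ===== PORT A =====
-- srcls[x].replace(" ", '').replace("\t", '').replace("\n", '')
def pvACond (line : String) : String :=
  PySem.Str.replace (PySem.Str.replace (PySem.Str.replace line " " "") "\t" "") "\n" ""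

-- the for-loop of A: state (fcombody, comstart, comstyle); break = return fcombody,
-- continue = recurse on the remaining indices with the updated state
def pvALoop (srcls : List String) (is_class_begin : Bool) :
    List Int → String → Int → Int → String
  | [], fcombody, _, _ => fcombody
  | x :: xs, fcombody, comstart, comstyle =>
    match PySem.List.pyGet? srcls x with
    | none => fcombody  -- srcls[x] IndexError: unreachable under Pre_
    | some line =>
      if is_class_begin &&
          PySem.Str.startswith (PySem.Str.replace line "\t" "    ") "    def " then
        fcombody
      else if PySem.Str.startswith line "def " || PySem.Str.startswith line "class " then
        fcombody
      else if comstart == -1 &&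
          (PySem.Str.startswith (pvACond line) "\"\"\"" ||
           PySem.Str.startswith (pvACond line) "r\"\"\"") then
        pvALoop srcls is_class_begin xs fcombody x 2
      else if comstyle == 2 && comstart != -1 &&
          PySem.Str.startswith (pvACond line) "\"\"\"" then
        fcombody
      else if comstart == -1 &&
          (PySem.Str.startswith (pvACond line) "'''" ||
           PySem.Str.startswith (pvACond line) "r'''") then
        pvALoop srcls is_class_begin xs fcombody x 1
      else if comstyle == 1 && comstart != -1 &&
          PySem.Str.startswith (pvACond line) "'''" then
        fcombody
      else if comstart != -1 then
        pvALoop srcls is_class_begin xs (fcombody ++ line) comstart comstyle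
      else
        pvALoop srcls is_class_begin xs fcombody comstart comstyle

def single_defcom_extract (start_from : Int) (srcls : List String) (is_class_begin : Bool) : String :=
  pvALoop srcls is_class_begin
    (PySem.List.pyRange (start_from + 1) (PySem.List.len srcls)) "" (-1) 0

-- ===== PORT B =====
def pvBBoundary (is_class_begin : Bool) (line : String) : Bool :=
  (is_class_begin &&
    PySem.Str.startswith (PySem.Str.replace line "\t" "    ") "    def ") ||
  PySem.Str.startswith line "def " || PySem.Str.startswith line "class "

def pvBCondensed (line : String) : String :=
  PySem.Str.replace (PySem.Str.replace (PySem.Str.replace line " " "") "\t" "") "\n" ""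

-- opener(line): the quote style a line opens, if any
def pvBOpener (line : String) : Option String :=
  if PySem.Str.startswith (pvBCondensed line) "\"\"\"" ||
     PySem.Str.startswith (pvBCondensed line) "r\"\"\"" then some "\"\"\""
  else if PySem.Str.startswith (pvBCondensed line) "'''" ||
          PySem.Str.startswith (pvBCondensed line) "r'''" then some "'''"
  else none

-- the pipeline of Source B on the forward slice `tail`
def pvBBody (is_class_begin : Bool) (tail : List String) : String :=
  let bidx := (List.findIdx? (fun l => pvBBoundary is_class_begin l) tail).getD tail.length
  let region := tail.take bidx
  match List.findIdx? (fun l => (pvBOpener l).isSome) region with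
  | none => ""
  | some o =>
    match region[o]? with
    | none => ""  -- unreachable: findIdx? returns an in-range index
    | some oline =>
      let quote := (pvBOpener oline).getD ""
      let rest := region.drop (o + 1)
      let cidx := (List.findIdx? (fun l => PySem.Str.startswith (pvBCondensed l) quote) rest).getD rest.length
      PySem.Str.join "" (rest.take cidx)

def single_defcom_extract_alt (start_from : Int) (srcls : List String) (is_class_begin : Bool) : String :=
  pvBBody is_class_begin (PySem.List.slice srcls (some (start_from + 1)) none)

-- ===== PRECONDITION & SPEC =====
-- Pre_ excludes start_from ≤ -2: there A reads lines through Python's negative indexing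
-- (raising IndexError below -len(srcls)-1), so the scan region of such a meaningless
-- header index is unspecified and B's forward slice is an equally defensible choice.
def Pre_single_defcom_extract (start_from : Int) (srcls : List String) (is_class_begin : Bool) : Prop :=
  -1 ≤ start_from
instance (start_from : Int) (srcls : List String) (is_class_begin : Bool) : Decidable (Pre_single_defcom_extract start_from srcls is_class_begin) := by unfold Pre_single_defcom_extract; infer_instance

def pvWitness_single_defcom_extract : Int × List String × Bool :=
  (0, ["def f():", "    \"\"\"", "    doc", "    \"\"\"", "x = 1"], false)

def Spec_single_defcom_extract (start_from : Int) (srcls : List String) (is_class_begin : Bool) (out : String) : Prop := out = single_defcom_extract_alt start_from srcls is_class_begin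
instance (start_from : Int) (srcls : List String) (is_class_begin : Bool) (out : String) : Decidable (Spec_single_defcom_extract start_from srcls is_class_begin out) := by unfold Spec_single_defcom_extract; infer_instance

-- ===== CLAIM (what is proved, stated in full; the proofs are below) =====
def Claim_equal_single_defcom_extract : Prop := ∀ (start_from : Int) (srcls : List String) (is_class_begin : Bool), Dom_single_defcom_extract start_from srcls is_class_begin → Pre_single_defcom_extract start_from srcls is_class_begin → Spec_single_defcom_extract start_from srcls is_class_begin (single_defcom_extract start_from srcls is_class_begin)

-- ===== LEMMAS AND PROOFS =====
-- proof-side recursive restatement of B's pipeline, used as a bridge between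
-- A's loop and B's index/slice computation
def pvBFind (is_class_begin : Bool) : List String → Option (String × List String)
  | [] => none
  | line :: rest =>
    if pvBBoundary is_class_begin line then none
    else if PySem.Str.startswith (pvBCondensed line) "\"\"\"" ||
            PySem.Str.startswith (pvBCondensed line) "r\"\"\"" then some ("\"\"\"", rest)
    else if PySem.Str.startswith (pvBCondensed line) "'''" ||
            PySem.Str.startswith (pvBCondensed line) "r'''" then some ("'''", rest)
    else pvBFind is_class_begin rest

def pvBCollect (is_class_begin : Bool) (quote : String) : List String → List String
  | [] => []
  | line :: rest =>
    if pvBBoundary is_class_begin line then []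
    else if PySem.Str.startswith (pvBCondensed line) quote then []
    else line :: pvBCollect is_class_begin quote rest

theorem pv_chars_join_empty_cons (a : List Char) (L : List (List Char)) :
    PySem.Chars.join [] (a::L) = a ++ PySem.Chars.join [] L := by
  cases L with
  | nil => rw [PySem.Chars.join_singleton, PySem.Chars.join_nil]; simp
  | cons b M => rw [PySem.Chars.join_cons_cons]; simp

theorem pv_str_join_empty_cons (a : String) (L : List String) :
    PySem.Str.join "" (a::L) = a ++ PySem.Str.join "" L := by
  unfold PySem.Str.join
  rw [show ("" : String).toList = [] from rfl, List.map_cons, pv_chars_join_empty_cons,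
    String.ofList_append, String.ofList_toList]

-- the started phase of A's loop (comstart = x0 ≥ 0, comstyle ∈ {1,2}) collects pvBCollect
theorem pvALoop_started (srcls : List String) (icb : Bool) (x0 style : Int) (q : String)
    (hx0 : 0 ≤ x0)
    (hstyle : (style = 2 ∧ q = "\"\"\"") ∨ (style = 1 ∧ q = "'''")) :
    ∀ (l : List String) (c : Int) (fcom : String), 0 ≤ c → srcls.drop c.toNat = l →
      pvALoop srcls icb (PySem.List.pyRange c (PySem.List.len srcls)) fcom x0 style
        = fcom ++ PySem.Str.join "" (pvBCollect icb q l) := by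
  intro l
  induction l with
  | nil =>
    intro c fcom hc hdrop
    have hcn : (PySem.List.len srcls) ≤ c := by
      have := List.drop_eq_nil_iff.mp hdrop
      simp [PySem.List.len]; omega
    rw [PySem.List.pyRange_one_eq_nil hcn]
    simp [pvALoop, pvBCollect, PySem.Str.join, PySem.Chars.join_nil]
  | cons line l' ih =>
    intro c fcom hc hdrop
    have hlen : c.toNat < srcls.length := by
      by_contra h
      rw [List.drop_eq_nil_iff.mpr (by omega)] at hdrop
      exact absurd hdrop (by simp)
    have hcn : c < PySem.List.len srcls := by simp [PySem.List.len]; omega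
    have hget : PySem.List.pyGet? srcls c = some line := by
      rw [PySem.List.pyGet?_of_nonneg srcls hc, ← List.head?_drop, hdrop]; rfl
    have hdrop' : srcls.drop (c + 1).toNat = l' := by
      have : (c + 1).toNat = c.toNat + 1 := by omega
      rw [this, ← List.drop_drop, hdrop]; rfl
    rw [PySem.List.pyRange_one_cons hcn]
    have hne : (x0 == -1) = false := by simp; omega
    have hne' : (x0 != -1) = true := by simp; omega
    unfold pvALoop
    rw [hget]
    simp only [hne, hne', Bool.false_and, Bool.and_true]
    by_cases hb1 : (icb && PySem.Str.startswith (PySem.Str.replace line "\t" "    ") "    def ") = true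
    · simp only [hb1, if_true, pvBCollect, pvBBoundary, Bool.true_or, PySem.Str.join]
      simp [PySem.Chars.join_nil]
    · simp only [Bool.not_eq_true] at hb1
      simp only [hb1, Bool.false_eq_true, if_false]
      by_cases hb2 : (PySem.Str.startswith line "def " || PySem.Str.startswith line "class ") = true
      · simp only [hb2, if_true, pvBCollect, pvBBoundary, hb1, Bool.false_or, if_true,
          PySem.Str.join]
        simp [PySem.Chars.join_nil]
      · simp only [Bool.not_eq_true] at hb2
        simp only [hb2, Bool.false_eq_true, if_false]
        have hbb : pvBBoundary icb line = false := by
          unfold pvBBoundary; rw [Bool.or_assoc, hb1, hb2]; rfl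
        rcases hstyle with ⟨hs, hq⟩ | ⟨hs, hq⟩
        · subst hs; subst hq
          simp only [show ((2:Int) == 2) = true from rfl, Bool.true_and]
          by_cases hcl : PySem.Str.startswith (pvACond line) "\"\"\"" = true
          · simp only [hcl, if_true, pvBCollect, hbb, Bool.false_eq_true, if_false,
              show pvBCondensed = pvACond from rfl, PySem.Str.join]
            simp [PySem.Chars.join_nil]
          · simp only [Bool.not_eq_true] at hcl
            simp only [hcl, Bool.false_eq_true, if_false,
              show ((2:Int) == 1) = false from rfl, Bool.false_and, if_false]
            rw [ih (c + 1) (fcom ++ line) (by omega) hdrop']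
            simp only [pvBCollect, hbb, Bool.false_eq_true, if_false,
              show pvBCondensed = pvACond from rfl, hcl, if_false]
            rw [pv_str_join_empty_cons, String.append_assoc]
            simp
        · subst hs; subst hq
          simp only [show ((1:Int) == 2) = false from rfl, Bool.false_and,
            show ((1:Int) == 1) = true from rfl, Bool.true_and]
          by_cases hcl : PySem.Str.startswith (pvACond line) "'''" = true
          · simp only [hcl, if_true, pvBCollect, hbb, Bool.false_eq_true, if_false,
              show pvBCondensed = pvACond from rfl, PySem.Str.join]
            simp [PySem.Chars.join_nil]
          · simp only [Bool.not_eq_true] at hcl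
            simp only [hcl, Bool.false_eq_true, if_false]
            rw [ih (c + 1) (fcom ++ line) (by omega) hdrop']
            simp only [pvBCollect, hbb, Bool.false_eq_true, if_false,
              show pvBCondensed = pvACond from rfl, hcl, if_false]
            rw [pv_str_join_empty_cons, String.append_assoc]
            simp

-- the searching phase of A's loop (comstart = -1) is pvBFind followed by pvBCollect
theorem pvALoop_searching (srcls : List String) (icb : Bool) :
    ∀ (l : List String) (c : Int) (style : Int), 0 ≤ c → srcls.drop c.toNat = l →
      pvALoop srcls icb (PySem.List.pyRange c (PySem.List.len srcls)) "" (-1) style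
        = (match pvBFind icb l with
           | none => ""
           | some (q, rest) => PySem.Str.join "" (pvBCollect icb q rest)) := by
  intro l
  induction l with
  | nil =>
    intro c style hc hdrop
    have hcn : (PySem.List.len srcls) ≤ c := by
      have := List.drop_eq_nil_iff.mp hdrop
      simp [PySem.List.len]; omega
    rw [PySem.List.pyRange_one_eq_nil hcn]
    simp [pvALoop, pvBFind]
  | cons line l' ih =>
    intro c style hc hdrop
    have hlen : c.toNat < srcls.length := by
      by_contra h
      rw [List.drop_eq_nil_iff.mpr (by omega)] at hdrop
      exact absurd hdrop (by simp)
    have hcn : c < PySem.List.len srcls := by simp [PySem.List.len]; omega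
    have hget : PySem.List.pyGet? srcls c = some line := by
      rw [PySem.List.pyGet?_of_nonneg srcls hc, ← List.head?_drop, hdrop]; rfl
    have hdrop' : srcls.drop (c + 1).toNat = l' := by
      have : (c + 1).toNat = c.toNat + 1 := by omega
      rw [this, ← List.drop_drop, hdrop]; rfl
    rw [PySem.List.pyRange_one_cons hcn]
    unfold pvALoop
    rw [hget]
    simp only [show ((-1 : Int) == -1) = true from rfl,
      show ((-1 : Int) != -1) = false from rfl, Bool.true_and, Bool.and_false,
      Bool.false_and]
    by_cases hb1 : (icb && PySem.Str.startswith (PySem.Str.replace line "\t" "    ") "    def ") = true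
    · have hbb : pvBBoundary icb line = true := by
        unfold pvBBoundary; rw [Bool.or_assoc, hb1]; rfl
      simp only [hb1, if_true, pvBFind, hbb]
    · simp only [Bool.not_eq_true] at hb1
      simp only [hb1, Bool.false_eq_true, if_false]
      by_cases hb2 : (PySem.Str.startswith line "def " || PySem.Str.startswith line "class ") = true
      · have hbb : pvBBoundary icb line = true := by
          unfold pvBBoundary; rw [Bool.or_assoc, hb2, hb1]; rfl
        simp only [hb2, if_true, pvBFind, hbb]
      · simp only [Bool.not_eq_true] at hb2
        simp only [hb2, Bool.false_eq_true, if_false]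
        have hbb : pvBBoundary icb line = false := by
          unfold pvBBoundary; rw [Bool.or_assoc, hb1, hb2]; rfl
        by_cases ho2 : (PySem.Str.startswith (pvACond line) "\"\"\"" ||
            PySem.Str.startswith (pvACond line) "r\"\"\"") = true
        · simp only [ho2, if_true]
          rw [pvALoop_started srcls icb c 2 "\"\"\"" hc (Or.inl ⟨rfl, rfl⟩) l' (c + 1) ""
            (by omega) hdrop']
          simp only [pvBFind, hbb, Bool.false_eq_true, if_false,
            show pvBCondensed = pvACond from rfl, ho2, if_true]
          rw [String.empty_append]
        · simp only [Bool.not_eq_true] at ho2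
          simp only [ho2, Bool.false_eq_true, if_false]
          by_cases ho1 : (PySem.Str.startswith (pvACond line) "'''" ||
              PySem.Str.startswith (pvACond line) "r'''") = true
          · simp only [ho1, if_true]
            rw [pvALoop_started srcls icb c 1 "'''" hc (Or.inr ⟨rfl, rfl⟩) l' (c + 1) ""
              (by omega) hdrop']
            simp only [pvBFind, hbb, Bool.false_eq_true, if_false,
              show pvBCondensed = pvACond from rfl, ho2, ho1, if_true, if_false]
            rw [String.empty_append]
          · simp only [Bool.not_eq_true] at ho1
            simp only [ho1, Bool.false_eq_true, if_false]
            rw [ih (c + 1) style (by omega) hdrop']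
            simp only [pvBFind, hbb, Bool.false_eq_true, if_false,
              show pvBCondensed = pvACond from rfl, ho2, ho1, if_false]

-- take up to the first index found = takeWhile of the negated predicate
theorem pv_take_findIdx {α : Type} (p : α → Bool) :
    ∀ (l : List α), l.take ((List.findIdx? p l).getD l.length)
      = l.takeWhile (fun x => !(p x)) := by
  intro l
  induction l with
  | nil => rfl
  | cons x xs ih =>
    rw [List.findIdx?_cons, List.takeWhile_cons]
    by_cases hp : p x = true
    · simp [hp]
    · simp only [Bool.not_eq_true] at hp
      simp only [hp, Bool.false_eq_true, if_false, Bool.not_false, if_true]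
      cases h : List.findIdx? p xs with
      | none =>
        rw [h] at ih
        simp only [Option.map_none, Option.getD_none, List.length_cons, List.take_succ_cons]
        rw [← ih]
        simp
      | some n =>
        rw [h] at ih
        simp only [Option.map_some, Option.getD_some, List.take_succ_cons]
        rw [← ih]
        simp

-- B's closer-truncation of the boundary-truncated region is pvBCollect on the raw list
theorem pvBCollect_eq_takeWhile (icb : Bool) (q : String) :
    ∀ (t : List String),
      List.takeWhile (fun l => !(PySem.Str.startswith (pvBCondensed l) q))
        (List.takeWhile (fun l => !(pvBBoundary icb l)) t) = pvBCollect icb q t := by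
  intro t
  induction t with
  | nil => rfl
  | cons line t' ih =>
    rw [List.takeWhile_cons]
    by_cases hb : pvBBoundary icb line = true
    · simp only [hb, Bool.not_true, Bool.false_eq_true, if_false, List.takeWhile_nil,
        pvBCollect, if_true]
    · simp only [Bool.not_eq_true] at hb
      simp only [hb, Bool.not_false, if_true, List.takeWhile_cons]
      by_cases hc : PySem.Str.startswith (pvBCondensed line) q = true
      · simp only [hc, Bool.not_true, Bool.false_eq_true, if_false, pvBCollect, hb,
          Bool.false_eq_true, if_true]
      · simp only [Bool.not_eq_true] at hc
        simp only [hc, Bool.not_false, if_true, pvBCollect, hb, Bool.false_eq_true,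
          if_false, ih]

-- B's pipeline equals the recursive pvBFind/pvBCollect composition
theorem pvBBody_eq (icb : Bool) :
    ∀ (tail : List String),
      pvBBody icb tail = (match pvBFind icb tail with
        | none => ""
        | some (q, rest) => PySem.Str.join "" (pvBCollect icb q rest)) := by
  intro tail
  simp only [pvBBody, pv_take_findIdx]
  induction tail with
  | nil => rfl
  | cons line t' ih =>
    rw [List.takeWhile_cons]
    by_cases hb : pvBBoundary icb line = true
    · simp only [hb, Bool.not_true, Bool.false_eq_true, if_false, List.findIdx?_nil,
        pvBFind, if_true]
    · simp only [Bool.not_eq_true] at hb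
      simp only [hb, Bool.not_false, if_true]
      rw [List.findIdx?_cons]
      by_cases ho2 : (PySem.Str.startswith (pvBCondensed line) "\"\"\"" ||
          PySem.Str.startswith (pvBCondensed line) "r\"\"\"") = true
      · have hop : pvBOpener line = some "\"\"\"" := by unfold pvBOpener; rw [if_pos ho2]
        simp only [hop, Option.isSome_some, if_true, List.getElem?_cons_zero,
          Option.getD_some, List.drop_succ_cons, List.drop_zero,
          pvBCollect_eq_takeWhile, pvBFind, hb, Bool.false_eq_true, if_false, ho2, if_true]
      · simp only [Bool.not_eq_true] at ho2
        by_cases ho1 : (PySem.Str.startswith (pvBCondensed line) "'''" ||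
            PySem.Str.startswith (pvBCondensed line) "r'''") = true
        · have hop : pvBOpener line = some "'''" := by
            unfold pvBOpener; rw [if_neg (by rw [ho2]; decide), if_pos ho1]
          simp only [hop, Option.isSome_some, if_true, List.getElem?_cons_zero,
            Option.getD_some, List.drop_succ_cons, List.drop_zero,
            pvBCollect_eq_takeWhile, pvBFind, hb, Bool.false_eq_true, if_false, ho2,
            ho1, if_true]
        · simp only [Bool.not_eq_true] at ho1
          have hop : pvBOpener line = none := by
            unfold pvBOpener; rw [if_neg (by rw [ho2]; decide), if_neg (by rw [ho1]; decide)]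
          simp only [hop, Option.isSome_none, Bool.false_eq_true, if_false]
          rw [show pvBFind icb (line :: t') = pvBFind icb t' by
            conv_lhs => rw [pvBFind]
            rw [if_neg (by rw [hb]; decide), if_neg (by rw [ho2]; decide),
              if_neg (by rw [ho1]; decide)]]
          rw [← ih]
          cases h : List.findIdx? (fun l => (pvBOpener l).isSome)
              (List.takeWhile (fun l => !(pvBBoundary icb l)) t') with
          | none => simp only [Option.map_none]
          | some o =>
            simp only [Option.map_some, List.getElem?_cons_succ, List.drop_succ_cons]

-- ===== VERDICT (by name: the statement is the Claim_ definition above) =====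
theorem single_defcom_extract_spec : Claim_equal_single_defcom_extract := by
  intro start_from srcls is_class_begin _ hpre
  unfold Spec_single_defcom_extract single_defcom_extract single_defcom_extract_alt
  have h1 : (0 : Int) ≤ start_from + 1 := by
    unfold Pre_single_defcom_extract at hpre; omega
  rw [PySem.List.slice_from srcls h1, pvBBody_eq]
  exact pvALoop_searching srcls is_class_begin (srcls.drop (start_from + 1).toNat)
    (start_from + 1) 0 h1 rfl
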